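-- pv_equiv track=rewrite | github.com/memoization-over-Recursion/Algorithms-and-data-structures | minPassesOfMatrix.py | convertNeg
-- ===== SOURCE A (Python) =====
-- def convertNeg( matrix ):
--     pos = allPosPositions( matrix )
--     passes = 0
--     while len( pos ) > 0:
--         cur = len( pos )
--         while cur  > 0:
--             row , col = pos.pop(0)
--             adjPos = adjacentpos( matrix , row , col )
--             for p in adjPos:
--                 row1 , col1 = p
--
--                 val = matrix[row1][col1]
--                 if val < 0:
--                     matrix[row1][col1] *= -1
--                     pos.append([row1 , col1])
--
--             cur -= 1
--
--         passes += 1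
--     return passes
--
-- def allPosPositions( matrix ):
--     pos = []
--     for i in range( len( matrix ) ):
--         for j in range( len ( matrix[i] ) ):
--             if matrix[i][j] > 0:
--                 pos.append([i,j])
--     return pos
--
-- def adjacentpos( matrix , row , col ):
--     ans = []
--     if row > 0:
--         ans.append([row - 1 , col])
--     if col > 0:
--         ans.append([row , col - 1 ])
--     if row < len( matrix ) - 1:
--         ans.append([row + 1 , col])
--     if col < len( matrix[0]) - 1:
--         ans.append([row , col+1])
--
--     return ans
-- ===== SOURCE B (Python) =====
-- def has_positive_neighbor(matrix, i, j):
--     for r, c in ((i - 1, j), (i + 1, j), (i, j - 1), (i, j + 1)):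
--         if 0 <= r < len(matrix) and 0 <= c < len(matrix[r]) and matrix[r][c] > 0:
--             return True
--     return False
--
--
-- def convertNeg(matrix):
--     if not any(v > 0 for row in matrix for v in row):
--         return 0
--     passes = 1
--     while True:
--         to_flip = [(i, j)
--                    for i, row in enumerate(matrix)
--                    for j, v in enumerate(row)
--                    if v < 0 and has_positive_neighbor(matrix, i, j)]
--         if not to_flip:
--             return passes
--         for i, j in to_flip:
--             matrix[i][j] *= -1
--         passes += 1
-- ===== Notes on version B (the rewrite author's own statement) =====
-- stated objective: alternative
-- what changed: Replaces A's queue-based multi-source BFS (pop(0), per-pass countdown, appending flipped cells) by a queueless fixed-point relaxation: each round rescans the whole matrix, collects every negative cell with a strictly positive neighbour, flips them all synchronously, and counts rounds until no cell flips; no queue or frontier list exists at all. …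
-- outside the precondition, e.g. on convertNeg([[1], [-1, -1]]): A returns 2, B returns 3; on convertNeg([[1], [0, 0]]): A returns 1, B returns 1
import Mathlib
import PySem

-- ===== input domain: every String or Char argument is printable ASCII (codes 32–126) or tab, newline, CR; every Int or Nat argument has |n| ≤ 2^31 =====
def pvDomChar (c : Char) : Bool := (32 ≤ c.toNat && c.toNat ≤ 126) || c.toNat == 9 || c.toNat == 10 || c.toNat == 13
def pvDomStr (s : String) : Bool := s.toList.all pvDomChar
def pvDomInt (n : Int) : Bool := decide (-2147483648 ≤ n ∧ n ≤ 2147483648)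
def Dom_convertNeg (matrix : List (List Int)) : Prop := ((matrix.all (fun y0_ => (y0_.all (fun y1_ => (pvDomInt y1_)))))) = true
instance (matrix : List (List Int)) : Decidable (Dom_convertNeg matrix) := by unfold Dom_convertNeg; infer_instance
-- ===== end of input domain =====

-- B replaces A's queue-based multi-source BFS (pop(0), per-pass countdown, flipped cells
-- appended to the queue) by a queueless fixed-point relaxation: each round rescans the whole
-- matrix, flips every negative cell with a strictly positive neighbour synchronously, and
-- counts rounds until nothing flips; same return value, and both Pythons flip the matrix in
-- place identically on the admitted inputs (the theorems are about the return value).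

-- ===== PORT A =====
-- Cell read/write primitives shared by both ports (matrix[r][c] read / 'matrix[r][c] = x').
-- Exact for the indices either program ever uses: both only index with 0 ≤ r, c in range
-- (A guards with row > 0 / col > 0 etc., B checks 0 <= r < len(matrix) explicitly), where
-- these equal Python's indexing; an out-of-range read would be an IndexError, excluded by Pre_.
def pvGetCell (m : List (List Int)) (r c : Int) : Int :=
  if 0 ≤ r ∧ 0 ≤ c then (m.getD r.toNat []).getD c.toNat 0 else 0

def pvSetCell (m : List (List Int)) (r c : Int) (x : Int) : List (List Int) :=
  if 0 ≤ r ∧ 0 ≤ c then m.set r.toNat ((m.getD r.toNat []).set c.toNat x) else m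

-- allPosPositions: 'for i in range(len(matrix)): for j in range(len(matrix[i])): …' —
-- the range-over-len loops walk the rows/cells in order with a counter (exact rendering).
def allPosRow (row : List Int) (i j : Int) : List (Int × Int) :=
  match row with
  | [] => []
  | v :: vs => (if v > 0 then [(i, j)] else []) ++ allPosRow vs i (j + 1)

def allPosAux (rows : List (List Int)) (i : Int) : List (Int × Int) :=
  match rows with
  | [] => []
  | row :: rest => allPosRow row i 0 ++ allPosAux rest (i + 1)

def allPosPositions (matrix : List (List Int)) : List (Int × Int) :=
  allPosAux matrix 0

-- adjacentpos: four guarded appends, in A's order (up, left, down, right)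
def adjacentpos (m : List (List Int)) (row col : Int) : List (Int × Int) :=
  (if row > 0 then [(row - 1, col)] else []) ++
  (if col > 0 then [(row, col - 1)] else []) ++
  (if row < (m.length : Int) - 1 then [(row + 1, col)] else []) ++
  (if col < (((PySem.List.pyGetD m 0 []).length : Int)) - 1 then [(row, col + 1)] else [])

-- 'for p in adjPos: … if val < 0: flip and append to pos' (appended items returned as .2)
def flipLoopA (m : List (List Int)) (adj : List (Int × Int)) (acc : List (Int × Int)) :
    List (List Int) × List (Int × Int) :=
  match adj with
  | [] => (m, acc)
  | p :: rest =>
    let val := pvGetCell m p.1 p.2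
    if val < 0 then flipLoopA (pvSetCell m p.1 p.2 (val * -1)) rest (acc ++ [p])
    else flipLoopA m rest acc

-- inner 'while cur > 0' loop: pops pos.pop(0) exactly cur times
def innerA (m : List (List Int)) (pos : List (Int × Int)) (cur : Nat) :
    List (List Int) × List (Int × Int) :=
  match cur, pos with
  | 0, _ => (m, pos)
  | _ + 1, [] => (m, [])   -- unreachable (cur ≤ len pos throughout); Python would raise IndexError
  | cur' + 1, p :: rest =>
    let r := flipLoopA m (adjacentpos m p.1 p.2) []
    innerA r.1 (rest ++ r.2) cur'

-- number of strictly negative cells: termination measure machinery for the while-loops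
def pvBneg (x : Int) : Nat := if x < 0 then 1 else 0
def pvRowNeg (row : List Int) : Nat := (row.map pvBneg).sum
def negCount (m : List (List Int)) : Nat := (m.map pvRowNeg).sum

theorem pvRowNeg_set : ∀ (row : List Int) (j : Nat) (x : Int), j < row.length →
    pvRowNeg (row.set j x) + pvBneg (row.getD j 0) = pvRowNeg row + pvBneg x := by
  intro row
  induction row with
  | nil => intro j x h; simp at h
  | cons a as ih =>
    intro j x h
    cases j with
    | zero => simp [pvRowNeg]; omega
    | succ n =>
      have := ih n x (by simpa using h)
      simp only [List.set_cons_succ, pvRowNeg, List.map_cons, List.sum_cons, List.getD_cons_succ] at *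
      omega

theorem negCount_set : ∀ (m : List (List Int)) (i : Nat) (row' : List Int), i < m.length →
    negCount (m.set i row') + pvRowNeg (m.getD i []) = negCount m + pvRowNeg row' := by
  intro m
  induction m with
  | nil => intro i row' h; simp at h
  | cons a as ih =>
    intro i row' h
    cases i with
    | zero => simp [negCount]; omega
    | succ n =>
      have := ih n row' (by simpa using h)
      simp only [List.set_cons_succ, negCount, List.map_cons, List.sum_cons, List.getD_cons_succ] at *
      omega

theorem negCount_flip (m : List (List Int)) (r c : Int) (h : pvGetCell m r c < 0) :
    negCount (pvSetCell m r c (pvGetCell m r c * -1)) + 1 = negCount m := by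
  unfold pvGetCell pvSetCell at *
  by_cases hg : 0 ≤ r ∧ 0 ≤ c
  · rw [if_pos hg] at h ⊢
    rw [if_pos hg]
    have hr : r.toNat < m.length := by
      by_contra hh
      rw [List.getD_eq_default _ _ (le_of_not_gt hh)] at h
      simp [List.getD] at h
    have hc : c.toNat < (m.getD r.toNat []).length := by
      by_contra hh
      rw [List.getD_eq_default _ _ (le_of_not_gt hh)] at h
      exact absurd h (by norm_num)
    have e1 := negCount_set m r.toNat
      ((m.getD r.toNat []).set c.toNat ((m.getD r.toNat []).getD c.toNat 0 * -1)) hr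
    have e2 := pvRowNeg_set (m.getD r.toNat []) c.toNat
      ((m.getD r.toNat []).getD c.toNat 0 * -1) hc
    have b1 : pvBneg ((m.getD r.toNat []).getD c.toNat 0) = 1 := by
      simp only [pvBneg]; rw [if_pos h]
    have b2 : pvBneg ((m.getD r.toNat []).getD c.toNat 0 * -1) = 0 := by
      have hx : ¬((m.getD r.toNat []).getD c.toNat 0 * -1 < 0) := by omega
      simp only [pvBneg]; rw [if_neg hx]
    omega
  · rw [if_neg hg] at h
    exact absurd h (by norm_num)

theorem flipLoopA_negCount : ∀ (adj : List (Int × Int)) (m : List (List Int)) (acc : List (Int × Int)),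
    negCount (flipLoopA m adj acc).1 + (flipLoopA m adj acc).2.length = negCount m + acc.length := by
  intro adj
  induction adj with
  | nil => intro m acc; simp [flipLoopA]
  | cons p rest ih =>
    intro m acc
    simp only [flipLoopA]
    by_cases hv : pvGetCell m p.1 p.2 < 0
    · rw [if_pos hv]
      have h1 := ih (pvSetCell m p.1 p.2 (pvGetCell m p.1 p.2 * -1)) (acc ++ [p])
      have h2 := negCount_flip m p.1 p.2 hv
      simp only [List.length_append, List.length_cons, List.length_nil] at *
      omega
    · rw [if_neg hv]
      exact ih m acc

theorem innerA_negCount : ∀ (cur : Nat) (m : List (List Int)) (pos : List (Int × Int)),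
    cur ≤ pos.length →
    negCount (innerA m pos cur).1 + (innerA m pos cur).2.length + cur = negCount m + pos.length := by
  intro cur
  induction cur with
  | zero => intro m pos _; simp [innerA]
  | succ n ih =>
    intro m pos h
    cases pos with
    | nil => simp at h
    | cons p rest =>
      simp only [innerA]
      have h1 := flipLoopA_negCount (adjacentpos m p.1 p.2) m []
      have h2 := ih (flipLoopA m (adjacentpos m p.1 p.2) []).1
        (rest ++ (flipLoopA m (adjacentpos m p.1 p.2) []).2)
        (by simp only [List.length_append]; simp only [List.length_cons] at h; omega)
      simp only [List.length_append, List.length_cons, List.length_nil] at *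
      omega

theorem outerA_dec (m : List (List Int)) (pos : List (Int × Int)) (h : ¬ pos = []) :
    2 * negCount (innerA m pos pos.length).1 + min (innerA m pos pos.length).2.length 1
      < 2 * negCount m + min pos.length 1 := by
  have h1 := innerA_negCount pos.length m pos (le_refl _)
  have h2 : 0 < pos.length := List.length_pos_of_ne_nil h
  omega

-- outer 'while len(pos) > 0' loop
def outerA (m : List (List Int)) (pos : List (Int × Int)) (passes : Int) : Int :=
  if h : pos = [] then passes
  else
    let r := innerA m pos pos.length
    outerA r.1 r.2 (passes + 1)
termination_by 2 * negCount m + min pos.length 1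
decreasing_by
  exact outerA_dec m pos h

def convertNeg (matrix : List (List Int)) : Int :=
  outerA matrix (allPosPositions matrix) 0

-- ===== PORT B =====
-- any(v > 0 for row in matrix for v in row)
def anyPositive (matrix : List (List Int)) : Bool :=
  matrix.any (fun row => row.any (fun v => v > 0))

-- has_positive_neighbor: the for-loop over the 4 candidates with early return = List.any
def hasPosNeighbor (m : List (List Int)) (i j : Int) : Bool :=
  [(i - 1, j), (i + 1, j), (i, j - 1), (i, j + 1)].any (fun q =>
    decide (0 ≤ q.1 ∧ q.1 < (m.length : Int) ∧ 0 ≤ q.2 ∧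
      q.2 < ((PySem.List.pyGetD m q.1 []).length : Int) ∧ pvGetCell m q.1 q.2 > 0))

-- the to_flip comprehension: nested enumerate generators with a filter clause
def toFlip (m : List (List Int)) : List (Int × Int) :=
  (PySem.List.enumerate m 0).flatMap (fun p =>
    (PySem.List.enumerate p.2 0).flatMap (fun q =>
      if q.2 < 0 ∧ hasPosNeighbor m p.1 q.1 = true then [(p.1, q.1)] else []))

-- 'for i, j in to_flip: matrix[i][j] *= -1'
def applyFlips (m : List (List Int)) (fs : List (Int × Int)) : List (List Int) :=
  match fs with
  | [] => m
  | f :: rest => applyFlips (pvSetCell m f.1 f.2 (pvGetCell m f.1 f.2 * -1)) rest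

-- 'while True: … if not to_flip: return passes; apply flips; passes += 1'
-- (fuel is only a totality guard: each iteration flips at least one strictly negative cell,
-- so negCount matrix + 1 steps always suffice — proved in loopB_dec below the claim)
def loopB (fuel : Nat) (m : List (List Int)) (passes : Int) : Int :=
  match fuel with
  | 0 => passes
  | fuel' + 1 =>
    if toFlip m = [] then passes
    else loopB fuel' (applyFlips m (toFlip m)) (passes + 1)

def convertNeg_alt (matrix : List (List Int)) : Int :=
  if anyPositive matrix = true then loopB (negCount matrix + 1) matrix 1 else 0

-- ===== PRECONDITION & SPEC =====
-- Pre_ excludes ragged matrices (rows of unequal length) that contain a positive entry: on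
-- those A's use of len(matrix[0]) as every row's column bound raises IndexError on some
-- inputs and returns accidental pass counts on others, while B uses each row's own length.
def Pre_convertNeg (matrix : List (List Int)) : Prop :=
  (∀ row ∈ matrix, row.length = (matrix.headD []).length) ∨
  (∀ row ∈ matrix, ∀ x ∈ row, x ≤ 0)
instance (matrix : List (List Int)) : Decidable (Pre_convertNeg matrix) := by
  unfold Pre_convertNeg; infer_instance

def pvWitness_convertNeg : List (List Int) := [[1, -2], [-3, 4]]

def Spec_convertNeg (matrix : List (List Int)) (out : Int) : Prop := out = convertNeg_alt matrix
instance (matrix : List (List Int)) (out : Int) : Decidable (Spec_convertNeg matrix out) := by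
  unfold Spec_convertNeg; infer_instance

-- ===== CLAIM (what is proved, stated in full; the proofs are below) =====
def Claim_equal_convertNeg : Prop := ∀ (matrix : List (List Int)), Dom_convertNeg matrix →
  Pre_convertNeg matrix → Spec_convertNeg matrix (convertNeg matrix)

-- ===== LEMMAS AND PROOFS =====

-- B's loop flips ≥ 1 negative cell per round, so negCount matrix + 1 fuel always suffices
theorem getD_set_eqI {α : Type} (l : List α) (i : Nat) (x d : α) (h : i < l.length) :
    (l.set i x).getD i d = x := by
  simp [List.getD, h]

theorem getD_set_neI {α : Type} (l : List α) (i j : Nat) (x d : α) (h : i ≠ j) :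
    (l.set i x).getD j d = l.getD j d := by
  simp [List.getD, List.getElem?_set, h]

theorem pvGet_set_ne (m : List (List Int)) (r c r' c' x : Int) (h1 : 0 ≤ r) (h2 : 0 ≤ c)
    (hne : ¬(r' = r ∧ c' = c)) :
    pvGetCell (pvSetCell m r c x) r' c' = pvGetCell m r' c' := by
  unfold pvGetCell pvSetCell
  by_cases hg : 0 ≤ r' ∧ 0 ≤ c'
  · rw [if_pos hg, if_pos hg, if_pos ⟨h1, h2⟩]
    by_cases hr : r.toNat = r'.toNat
    · have hcc : c.toNat ≠ c'.toNat := by omega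
      rw [← hr]
      by_cases hlt : r.toNat < m.length
      · rw [getD_set_eqI _ _ _ _ hlt, getD_set_neI _ _ _ _ _ hcc]
      · rw [List.set_eq_of_length_le (le_of_not_gt hlt)]
    · rw [getD_set_neI _ _ _ _ _ hr]
  · rw [if_neg hg, if_neg hg]

theorem pvGet_natCast (m : List (List Int)) (i j : Nat) :
    pvGetCell m (i : Int) (j : Int) = (m.getD i []).getD j 0 := by
  simp [pvGetCell]

theorem mem_toFlip (m : List (List Int)) (c : Int × Int) :
    c ∈ toFlip m ↔ (0 ≤ c.1 ∧ c.1 < (m.length : Int) ∧ 0 ≤ c.2 ∧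
      c.2 < ((PySem.List.pyGetD m c.1 []).length : Int) ∧ pvGetCell m c.1 c.2 < 0 ∧
      hasPosNeighbor m c.1 c.2 = true) := by
  unfold toFlip
  simp only [List.mem_flatMap, PySem.List.mem_enumerate_iff]
  constructor
  · rintro ⟨p, ⟨k, hk, hp⟩, q, hq', hq⟩
    rw [zero_add] at hp
    subst hp
    obtain ⟨t, ht, hq'⟩ := hq'
    rw [zero_add] at hq'
    subst hq'
    simp only at hq ht
    split_ifs at hq with hc
    · simp only [List.mem_singleton] at hq
      subst hq
      simp only at hc
      obtain ⟨hneg, hpos⟩ := hc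
      have hget : pvGetCell m (k : Int) (t : Int) = m[k][t] := by
        rw [pvGet_natCast, List.getD_eq_getElem _ _ hk, List.getD_eq_getElem _ _ ht]
      have hpy : PySem.List.pyGetD m ((k : Int)) [] = m[k] := by
        rw [PySem.List.pyGetD_natCast, List.getD_eq_getElem _ _ hk]
      refine ⟨by simp, by simp; omega, by simp, ?_, ?_, hpos⟩
      · show (↑t : Int) < ((PySem.List.pyGetD m (↑k) []).length : Int)
        rw [hpy]; omega
      · show pvGetCell m (↑k) (↑t) < 0
        rw [hget]
        exact hneg
    · simp at hq
  · rintro ⟨h1, h2, h3, h4, h5, h6⟩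
    obtain ⟨i, j⟩ := c
    have hk : i.toNat < m.length := by omega
    have hi : i = ((i.toNat : Nat) : Int) := by omega
    have hpy : PySem.List.pyGetD m i [] = m[i.toNat] := by
      rw [PySem.List.pyGetD_eq_getElem m [] h1 h2]
    rw [hpy] at h4
    have ht : j.toNat < m[i.toNat].length := by simp at h4 ⊢; omega
    refine ⟨(i, m[i.toNat]), ⟨i.toNat, hk, by simp; omega⟩,
      (j, m[i.toNat][j.toNat]), ⟨j.toNat, ht, by simp; omega⟩, ?_⟩
    have hget : pvGetCell m i j = m[i.toNat][j.toNat] := by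
      unfold pvGetCell
      rw [if_pos ⟨h1, h3⟩, List.getD_eq_getElem _ _ hk, List.getD_eq_getElem _ _ ht]
    rw [if_pos ⟨by rw [← hget]; exact h5, h6⟩]
    simp

theorem fst_of_mem_inner (m : List (List Int)) (p : Int × List Int) (a : Int × Int)
    (ha : a ∈ (PySem.List.enumerate p.2 0).flatMap (fun q =>
      if q.2 < 0 ∧ hasPosNeighbor m p.1 q.1 = true then [(p.1, q.1)] else [])) : a.1 = p.1 := by
  rw [List.mem_flatMap] at ha
  obtain ⟨q, _, ha⟩ := ha
  split_ifs at ha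
  · simp at ha
    rw [ha]
  · simp at ha

theorem nodup_toFlip (m : List (List Int)) : (toFlip m).Nodup := by
  unfold toFlip
  rw [List.nodup_flatMap]
  constructor
  · intro p hp
    rw [List.nodup_flatMap]
    constructor
    · intro q hq
      split_ifs <;> simp
    · have hpl := PySem.List.pairwise_lt_enumerate p.2 0
      refine hpl.imp ?_
      intro q q' hlt
      rw [Function.onFun, List.disjoint_left]
      intro a ha ha'
      split_ifs at ha ha' <;> simp at ha ha'
      rw [ha] at ha'
      rw [Prod.ext_iff] at ha'
      simp at ha'
      omega
  · have hpl := PySem.List.pairwise_lt_enumerate m 0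
    refine hpl.imp ?_
    intro p p' hlt
    rw [Function.onFun, List.disjoint_left]
    intro a ha ha'
    have h1 := fst_of_mem_inner m p a ha
    have h2 := fst_of_mem_inner m p' a ha'
    omega

theorem negCount_applyFlips : ∀ (fs : List (Int × Int)) (m : List (List Int)),
    fs.Nodup → (∀ f ∈ fs, 0 ≤ f.1 ∧ 0 ≤ f.2 ∧ pvGetCell m f.1 f.2 < 0) →
    negCount (applyFlips m fs) + fs.length = negCount m := by
  intro fs
  induction fs with
  | nil => intro m _ _; simp [applyFlips]
  | cons f rest ih =>
    intro m hnd hprop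
    obtain ⟨hf1, hf2, hf3⟩ := hprop f (by simp)
    simp only [applyFlips]
    have hrec := ih (pvSetCell m f.1 f.2 (pvGetCell m f.1 f.2 * -1)) (List.Nodup.of_cons hnd)
      (by
        intro g hg
        obtain ⟨hg1, hg2, hg3⟩ := hprop g (by simp [hg])
        refine ⟨hg1, hg2, ?_⟩
        rw [pvGet_set_ne m f.1 f.2 g.1 g.2 _ hf1 hf2 ?_]
        · exact hg3
        · rintro ⟨e1, e2⟩
          have : g = f := Prod.ext e1 e2
          exact (List.nodup_cons.mp hnd).1 (this ▸ hg))
    have hflip := negCount_flip m f.1 f.2 hf3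
    simp only [List.length_cons]
    omega

theorem loopB_dec (m : List (List Int)) (h : ¬ toFlip m = []) :
    negCount (applyFlips m (toFlip m)) < negCount m := by
  have h1 := negCount_applyFlips (toFlip m) m (nodup_toFlip m)
    (by
      intro f hf
      have := (mem_toFlip m f).mp hf
      exact ⟨this.1, this.2.2.1, this.2.2.2.2.1⟩)
  have h2 : 0 < (toFlip m).length := List.length_pos_of_ne_nil h
  omega


-- shape, rectangularity, in-range and adjacency predicates used by the invariants
def rowLens (m : List (List Int)) : List Nat := m.map List.length
def pvRect (m : List (List Int)) (cols : Nat) : Prop := ∀ row ∈ m, row.length = cols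
def pvInR (rows cols : Nat) (p : Int × Int) : Prop :=
  0 ≤ p.1 ∧ p.1 < (rows : Int) ∧ 0 ≤ p.2 ∧ p.2 < (cols : Int)
def pvPcand (rows cols : Nat) (p : Int × Int) : Bool :=
  decide (0 ≤ p.1 ∧ p.1 < (rows : Int) ∧ 0 ≤ p.2 ∧ p.2 < (cols : Int))
def AdjP (p c : Int × Int) : Prop :=
  c = (p.1 - 1, p.2) ∨ c = (p.1, p.2 - 1) ∨ c = (p.1 + 1, p.2) ∨ c = (p.1, p.2 + 1)

-- the set of cells one A-pass over queue 'pos' flips: in-range, negative, adjacent to pos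
def SAp (rows cols : Nat) (m : List (List Int)) (pos : List (Int × Int)) (c : Int × Int) : Prop :=
  pvInR rows cols c ∧ pvGetCell m c.1 c.2 < 0 ∧ ∃ p ∈ pos, AdjP p c

-- the BFS invariant (pvInv) tying A's queue to the matrix: queue cells are in-range and positive, and
-- every positive in-range neighbour of a negative in-range cell is in the queue
def pvInv (rows cols : Nat) (m : List (List Int)) (pos : List (Int × Int)) : Prop :=
  (∀ p ∈ pos, pvInR rows cols p ∧ pvGetCell m p.1 p.2 > 0) ∧
  (∀ c q : Int × Int, pvInR rows cols c → pvGetCell m c.1 c.2 < 0 → AdjP c q →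
    pvInR rows cols q → pvGetCell m q.1 q.2 > 0 → q ∈ pos)

theorem AdjP_symm (p c : Int × Int) (h : AdjP p c) : AdjP c p := by
  rcases h with h | h | h | h <;> subst h <;> simp [AdjP, Prod.ext_iff]

theorem pvGet_neg_in_range (m : List (List Int)) (r c : Int) (h : pvGetCell m r c < 0) :
    0 ≤ r ∧ 0 ≤ c ∧ r.toNat < m.length ∧ c.toNat < (m.getD r.toNat []).length := by
  unfold pvGetCell at h
  by_cases hg : 0 ≤ r ∧ 0 ≤ c
  · rw [if_pos hg] at h
    refine ⟨hg.1, hg.2, ?_, ?_⟩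
    · by_contra hh
      rw [List.getD_eq_default _ _ (le_of_not_gt hh)] at h
      simp [List.getD] at h
    · by_contra hh
      rw [List.getD_eq_default _ _ (le_of_not_gt hh)] at h
      exact absurd h (by norm_num)
  · rw [if_neg hg] at h
    exact absurd h (by norm_num)

theorem pvGet_set_flip (m : List (List Int)) (q : Int × Int)
    (h : pvGetCell m q.1 q.2 < 0) (x : Int) : ∀ i j : Int,
    pvGetCell (pvSetCell m q.1 q.2 x) i j =
      if i = q.1 ∧ j = q.2 then x else pvGetCell m i j := by
  obtain ⟨h1, h2, h3, h4⟩ := pvGet_neg_in_range m q.1 q.2 h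
  intro i j
  by_cases hij : i = q.1 ∧ j = q.2
  · rw [if_pos hij]
    obtain ⟨rfl, rfl⟩ := hij
    unfold pvGetCell pvSetCell
    rw [if_pos ⟨h1, h2⟩, if_pos ⟨h1, h2⟩, getD_set_eqI _ _ _ _ h3, getD_set_eqI _ _ _ _ h4]
  · rw [if_neg hij]
    exact pvGet_set_ne m q.1 q.2 i j x h1 h2 hij

theorem map_len_set : ∀ (m : List (List Int)) (i : Nat) (row' : List Int),
    row'.length = (m.getD i []).length →
    (m.set i row').map List.length = m.map List.length := by
  intro m
  induction m with
  | nil => intro i row' _; simp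
  | cons a as ih =>
    intro i row' h
    cases i with
    | zero => simp at h ⊢; exact h
    | succ n =>
      simp only [List.set_cons_succ, List.map_cons, List.cons.injEq]
      exact ⟨trivial, ih n row' (by simpa using h)⟩

theorem rowLens_setCell (m : List (List Int)) (r c x : Int) :
    rowLens (pvSetCell m r c x) = rowLens m := by
  unfold pvSetCell rowLens
  split
  · exact map_len_set m r.toNat _ (by simp)
  · rfl

theorem rect_of_rowLens (m m' : List (List Int)) (cols : Nat)
    (h : rowLens m' = rowLens m) (hR : pvRect m cols) : pvRect m' cols := by
  intro row hrow
  have hm : row.length ∈ rowLens m := by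
    rw [← h]
    exact List.mem_map_of_mem hrow
  obtain ⟨row2, hrow2, he⟩ := List.mem_map.mp hm
  rw [← he]
  exact hR _ hrow2

theorem length_of_rowLens (m m' : List (List Int)) (h : rowLens m' = rowLens m) :
    m'.length = m.length := by
  have := congrArg List.length h
  simpa [rowLens] using this

theorem matEq (m1 m2 : List (List Int)) (h : rowLens m1 = rowLens m2)
    (hp : ∀ i j : Int, pvGetCell m1 i j = pvGetCell m2 i j) : m1 = m2 := by
  have hlen : m1.length = m2.length := by
    have := congrArg List.length h
    simpa [rowLens] using this
  refine List.ext_getElem hlen ?_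
  intro i hi1 hi2
  have hrl : m1[i].length = m2[i].length := by
    have e1 : (rowLens m1)[i]'(by simpa [rowLens] using hi1) = m1[i].length := by simp [rowLens]
    have e2 : (rowLens m2)[i]'(by simpa [rowLens] using hi2) = m2[i].length := by simp [rowLens]
    rw [← e1, ← e2]
    congr 1
  refine List.ext_getElem hrl ?_
  intro j hj1 hj2
  have := hp (i : Int) (j : Int)
  rw [pvGet_natCast, pvGet_natCast, List.getD_eq_getElem _ _ hi1, List.getD_eq_getElem _ _ hi2,
    List.getD_eq_getElem _ _ hj1, List.getD_eq_getElem _ _ hj2] at this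
  exact this

theorem adj_nodup (p : Int × Int) :
    ([(p.1 - 1, p.2), (p.1, p.2 - 1), (p.1 + 1, p.2), (p.1, p.2 + 1)] : List (Int × Int)).Nodup := by
  simp [List.nodup_cons, Prod.ext_iff]
  omega

theorem adj_filter (m : List (List Int)) (r c : Int) (rows cols : Nat)
    (hlen : m.length = rows) (hR : pvRect m cols) (h : pvInR rows cols (r, c)) :
    adjacentpos m r c
      = [(r - 1, c), (r, c - 1), (r + 1, c), (r, c + 1)].filter (pvPcand rows cols) := by
  obtain ⟨h1, h2, h3, h4⟩ := h
  subst hlen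
  have hl : 0 < m.length := by omega
  have hc0 : (PySem.List.pyGetD m 0 []).length = cols := by
    rw [PySem.List.pyGetD_zero, List.getD_eq_getElem _ _ hl]
    exact hR _ (List.getElem_mem hl)
  have e1 : (pvPcand m.length cols (r - 1, c) = true) ↔ (r > 0) := by
    simp only [pvPcand, decide_eq_true_eq]; omega
  have e2 : (pvPcand m.length cols (r, c - 1) = true) ↔ (c > 0) := by
    simp only [pvPcand, decide_eq_true_eq]; omega
  have e3 : (pvPcand m.length cols (r + 1, c) = true) ↔ (r < (m.length : Int) - 1) := by
    simp only [pvPcand, decide_eq_true_eq]; omega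
  have e4 : (pvPcand m.length cols (r, c + 1) = true)
      ↔ (c < (((PySem.List.pyGetD m 0 []).length : Int)) - 1) := by
    simp only [pvPcand, decide_eq_true_eq, hc0]; omega
  unfold adjacentpos
  simp only [List.filter_cons, List.filter_nil, e1, e2, e3, e4]
  split_ifs <;> simp

theorem adj_mem (m : List (List Int)) (p : Int × Int) (rows cols : Nat)
    (hlen : m.length = rows) (hR : pvRect m cols) (hp : pvInR rows cols p) (c : Int × Int) :
    c ∈ adjacentpos m p.1 p.2 ↔ AdjP p c ∧ pvInR rows cols c := by
  rw [adj_filter m p.1 p.2 rows cols hlen hR (by simpa using hp)]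
  simp only [List.mem_filter, List.mem_cons, List.mem_singleton, List.not_mem_nil, or_false]
  constructor
  · rintro ⟨hm, hc⟩
    exact ⟨by simpa [AdjP] using hm, by simpa [pvPcand, pvInR, decide_eq_true_eq] using hc⟩
  · rintro ⟨hm, hc⟩
    exact ⟨by simpa [AdjP] using hm, by simpa [pvPcand, pvInR, decide_eq_true_eq] using hc⟩

-- one pop of the inner loop flips exactly the negative cells of the adjacency list
theorem flipChar : ∀ (adj : List (Int × Int)) (m : List (List Int)) (acc : List (Int × Int)),
    adj.Nodup →
    rowLens (flipLoopA m adj acc).1 = rowLens m ∧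
    (∀ i j : Int, pvGetCell (flipLoopA m adj acc).1 i j =
      if (i, j) ∈ adj ∧ pvGetCell m i j < 0 then pvGetCell m i j * -1 else pvGetCell m i j) ∧
    (∀ c, c ∈ (flipLoopA m adj acc).2 ↔ c ∈ acc ∨ (c ∈ adj ∧ pvGetCell m c.1 c.2 < 0)) := by
  intro adj
  induction adj with
  | nil =>
    intro m acc _
    refine ⟨rfl, ?_, ?_⟩
    · intro i j
      rw [if_neg (by simp)]
      rfl
    · intro c
      simp [flipLoopA]
  | cons q rest ih =>
    intro m acc hnd
    obtain ⟨hqn, hndr⟩ := List.nodup_cons.mp hnd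
    simp only [flipLoopA]
    by_cases hv : pvGetCell m q.1 q.2 < 0
    · rw [if_pos hv]
      have hset := pvGet_set_flip m q hv (pvGetCell m q.1 q.2 * -1)
      obtain ⟨ih1, ih2, ih3⟩ := ih (pvSetCell m q.1 q.2 (pvGetCell m q.1 q.2 * -1)) (acc ++ [q]) hndr
      refine ⟨ih1.trans (rowLens_setCell m q.1 q.2 _), ?_, ?_⟩
      · intro i j
        rw [ih2 i j]
        by_cases hq : i = q.1 ∧ j = q.2
        · have hpq : (i, j) = q := by
            obtain ⟨rfl, rfl⟩ := hq
            rfl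
          have hgm : pvGetCell m i j = pvGetCell m q.1 q.2 := by rw [hq.1, hq.2]
          rw [if_neg (by
            rintro ⟨hmem, _⟩
            exact hqn (hpq ▸ hmem))]
          rw [hset i j, if_pos hq,
            if_pos ⟨by rw [hpq]; exact List.mem_cons_self, by rw [hgm]; exact hv⟩, hgm]
        · have hgm : pvGetCell (pvSetCell m q.1 q.2 (pvGetCell m q.1 q.2 * -1)) i j
              = pvGetCell m i j := by
            rw [hset i j, if_neg hq]
          rw [hgm]
          have hcond : ((i, j) ∈ (q :: rest) ∧ pvGetCell m i j < 0)
              ↔ ((i, j) ∈ rest ∧ pvGetCell m i j < 0) := by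
            constructor
            · rintro ⟨hm_, hg⟩
              rcases List.mem_cons.mp hm_ with he | hm2
              · rw [Prod.ext_iff] at he
                exact absurd he hq
              · exact ⟨hm2, hg⟩
            · rintro ⟨hm2, hg⟩
              exact ⟨List.mem_cons_of_mem _ hm2, hg⟩
          simp only [hcond]
      · intro c
        rw [ih3 c]
        by_cases hcq : c = q
        · subst hcq
          simp [List.mem_append, hqn, hv]
        · have hgc : pvGetCell (pvSetCell m q.1 q.2 (pvGetCell m q.1 q.2 * -1)) c.1 c.2
              = pvGetCell m c.1 c.2 := by
            rw [hset c.1 c.2, if_neg (by rw [← Prod.ext_iff]; exact hcq)]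
          simp only [List.mem_append, List.mem_singleton, List.mem_cons, hgc, hcq]
          tauto
    · rw [if_neg hv]
      obtain ⟨ih1, ih2, ih3⟩ := ih m acc hndr
      refine ⟨ih1, ?_, ?_⟩
      · intro i j
        rw [ih2 i j]
        by_cases hq : i = q.1 ∧ j = q.2
        · have hgm : pvGetCell m i j = pvGetCell m q.1 q.2 := by rw [hq.1, hq.2]
          rw [if_neg (by rintro ⟨_, hg⟩; rw [hgm] at hg; exact hv hg),
              if_neg (by rintro ⟨_, hg⟩; rw [hgm] at hg; exact hv hg)]
        · have hcond : ((i, j) ∈ (q :: rest) ∧ pvGetCell m i j < 0)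
              ↔ ((i, j) ∈ rest ∧ pvGetCell m i j < 0) := by
            constructor
            · rintro ⟨hm_, hg⟩
              rcases List.mem_cons.mp hm_ with he | hm2
              · rw [Prod.ext_iff] at he
                exact absurd he hq
              · exact ⟨hm2, hg⟩
            · rintro ⟨hm2, hg⟩
              exact ⟨List.mem_cons_of_mem _ hm2, hg⟩
          simp only [hcond]
      · intro c
        rw [ih3 c]
        by_cases hcq : c = q
        · subst hcq
          simp [hv]
        · simp [hcq]

-- one whole A-pass (the first cur queue entries) flips exactly SAp of the processed prefix
set_option maxHeartbeats 1000000 in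
theorem innerChar : ∀ (cur : Nat) (pos : List (Int × Int)) (m : List (List Int)) (rows cols : Nat),
    m.length = rows → pvRect m cols → cur ≤ pos.length →
    (∀ p ∈ pos.take cur, pvInR rows cols p) →
    rowLens (innerA m pos cur).1 = rowLens m ∧
    (∀ i j : Int, (SAp rows cols m (pos.take cur) (i, j) →
        pvGetCell (innerA m pos cur).1 i j = pvGetCell m i j * -1) ∧
      (¬ SAp rows cols m (pos.take cur) (i, j) →
        pvGetCell (innerA m pos cur).1 i j = pvGetCell m i j)) ∧
    (∀ c, c ∈ (innerA m pos cur).2 ↔ c ∈ pos.drop cur ∨ SAp rows cols m (pos.take cur) c) := by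
  intro cur
  induction cur with
  | zero =>
    intro pos m rows cols _ _ _ _
    refine ⟨rfl, ?_, ?_⟩
    · intro i j
      constructor
      · rintro ⟨_, _, p, hp, _⟩
        simp at hp
      · intro _
        rfl
    · intro c
      simp only [List.take_zero, List.drop_zero, SAp]
      simp [innerA]
  | succ n ih =>
    intro pos m rows cols hlen hR hcur hTake
    cases pos with
    | nil => simp at hcur
    | cons p rest =>
      simp only [innerA]
      have hp : pvInR rows cols p := hTake p (by simp [List.take_succ_cons])
      have hadjmem := adj_mem m p rows cols hlen hR hp
      have hadjnd : (adjacentpos m p.1 p.2).Nodup := by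
        rw [adj_filter m p.1 p.2 rows cols hlen hR (by simpa using hp)]
        exact (adj_nodup p).filter _
      obtain ⟨f1, f2, f3⟩ := flipChar (adjacentpos m p.1 p.2) m [] hadjnd
      set m1 := (flipLoopA m (adjacentpos m p.1 p.2) []).1 with hm1
      set nw := (flipLoopA m (adjacentpos m p.1 p.2) []).2 with hnw
      have hlen1 : m1.length = rows := (length_of_rowLens m m1 f1).trans hlen
      have hR1 : pvRect m1 cols := rect_of_rowLens m m1 cols f1 hR
      have hnle : n ≤ rest.length := by simpa using hcur
      have hkle : n ≤ (rest ++ nw).length := by simp; omega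
      have htk : (rest ++ nw).take n = rest.take n := List.take_append_of_le_length hnle
      have hdk : (rest ++ nw).drop n = rest.drop n ++ nw := List.drop_append_of_le_length hnle
      have hTake1 : ∀ p' ∈ (rest ++ nw).take n, pvInR rows cols p' := by
        rw [htk]
        intro p' hp'
        exact hTake p' (by simp [List.take_succ_cons]; right; exact hp')
      obtain ⟨i1, i2, i3⟩ := ih (rest ++ nw) m1 rows cols hlen1 hR1 hkle hTake1
      rw [htk] at i2
      rw [htk, hdk] at i3
      have hSA1 : ∀ c : Int × Int, SAp rows cols m1 (rest.take n) c ↔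
          (SAp rows cols m (rest.take n) c ∧
            ¬(c ∈ adjacentpos m p.1 p.2 ∧ pvGetCell m c.1 c.2 < 0)) := by
        intro c
        have hv := f2 c.1 c.2
        by_cases hcc : c ∈ adjacentpos m p.1 p.2 ∧ pvGetCell m c.1 c.2 < 0
        · rw [if_pos (by simpa [Prod.mk.eta] using hcc)] at hv
          constructor
          · rintro ⟨_, hneg, _⟩
            rw [hv] at hneg
            omega
          · rintro ⟨_, hc2⟩
            exact absurd hcc hc2
        · rw [if_neg (by simpa [Prod.mk.eta] using hcc)] at hv
          unfold SAp
          rw [hv]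
          tauto
      have hSplit : ∀ c : Int × Int, SAp rows cols m ((p :: rest).take (n + 1)) c ↔
          ((c ∈ adjacentpos m p.1 p.2 ∧ pvGetCell m c.1 c.2 < 0) ∨
            SAp rows cols m (rest.take n) c) := by
        intro c
        rw [List.take_succ_cons]
        constructor
        · rintro ⟨hin, hneg, p', hp', hadj⟩
          rcases List.mem_cons.mp hp' with rfl | hp2
          · exact Or.inl ⟨(hadjmem c).mpr ⟨hadj, hin⟩, hneg⟩
          · exact Or.inr ⟨hin, hneg, p', hp2, hadj⟩
        · rintro (⟨hmem, hneg⟩ | ⟨hin, hneg, p', hp', hadj⟩)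
          · obtain ⟨hadj, hin⟩ := (hadjmem c).mp hmem
            exact ⟨hin, hneg, p, List.mem_cons_self, hadj⟩
          · exact ⟨hin, hneg, p', List.mem_cons_of_mem _ hp', hadj⟩
      refine ⟨i1.trans f1, ?_, ?_⟩
      · intro i j
        constructor
        · intro hS
          by_cases hcc : (i, j) ∈ adjacentpos m p.1 p.2 ∧ pvGetCell m i j < 0
          · have hnot : ¬ SAp rows cols m1 (rest.take n) (i, j) := by
              rw [hSA1]
              tauto
            rw [(i2 i j).2 hnot, f2 i j, if_pos hcc]
          · have hS2 : SAp rows cols m (rest.take n) (i, j) := by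
              rcases (hSplit (i, j)).mp hS with h | h
              · exact absurd h hcc
              · exact h
            rw [(i2 i j).1 (by rw [hSA1]; exact ⟨hS2, hcc⟩), f2 i j, if_neg hcc]
        · intro hnS
          have hcc : ¬((i, j) ∈ adjacentpos m p.1 p.2 ∧ pvGetCell m i j < 0) :=
            fun h => hnS ((hSplit _).mpr (Or.inl h))
          have h2 : ¬ SAp rows cols m (rest.take n) (i, j) :=
            fun h => hnS ((hSplit _).mpr (Or.inr h))
          have hnot : ¬ SAp rows cols m1 (rest.take n) (i, j) := by
            rw [hSA1]
            tauto
          rw [(i2 i j).2 hnot, f2 i j, if_neg hcc]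
      · intro c
        rw [i3 c]
        have hnew : c ∈ nw ↔ (c ∈ adjacentpos m p.1 p.2 ∧ pvGetCell m c.1 c.2 < 0) := by
          rw [f3 c]
          simp
        have hsa1 := hSA1 c
        have hsp := hSplit c
        rw [List.drop_succ_cons]
        simp only [List.mem_append] at *
        tauto

-- B's applyFlips flips exactly the listed (distinct) cells
theorem applyChar : ∀ (fs : List (Int × Int)) (m : List (List Int)),
    fs.Nodup → (∀ f ∈ fs, pvGetCell m f.1 f.2 < 0) →
    rowLens (applyFlips m fs) = rowLens m ∧
    (∀ i j : Int, pvGetCell (applyFlips m fs) i j =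
      if (i, j) ∈ fs then pvGetCell m i j * -1 else pvGetCell m i j) := by
  intro fs
  induction fs with
  | nil =>
    intro m _ _
    refine ⟨rfl, ?_⟩
    intro i j
    rw [if_neg (by simp)]
    rfl
  | cons f rest ih =>
    intro m hnd hprop
    obtain ⟨hfn, hndr⟩ := List.nodup_cons.mp hnd
    have hneg : pvGetCell m f.1 f.2 < 0 := hprop f (List.mem_cons_self)
    have hset := pvGet_set_flip m f hneg (pvGetCell m f.1 f.2 * -1)
    simp only [applyFlips]
    obtain ⟨ih1, ih2⟩ := ih (pvSetCell m f.1 f.2 (pvGetCell m f.1 f.2 * -1)) hndr (by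
      intro g hg
      have hgne : ¬(g.1 = f.1 ∧ g.2 = f.2) := by
        rw [← Prod.ext_iff]
        intro h
        exact hfn (h ▸ hg)
      rw [hset g.1 g.2, if_neg hgne]
      exact hprop g (List.mem_cons_of_mem _ hg))
    refine ⟨ih1.trans (rowLens_setCell m f.1 f.2 _), ?_⟩
    intro i j
    rw [ih2 i j]
    by_cases hq : i = f.1 ∧ j = f.2
    · have hpf : (i, j) = f := by
        obtain ⟨rfl, rfl⟩ := hq
        rfl
      have hgm : pvGetCell m i j = pvGetCell m f.1 f.2 := by rw [hq.1, hq.2]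
      rw [if_neg (fun hm_ => hfn (hpf ▸ hm_)), hset i j, if_pos hq,
        if_pos (by rw [hpf]; exact List.mem_cons_self), hgm]
    · have hgm : pvGetCell (pvSetCell m f.1 f.2 (pvGetCell m f.1 f.2 * -1)) i j
          = pvGetCell m i j := by
        rw [hset i j, if_neg hq]
      rw [hgm]
      have hcond : ((i, j) ∈ (f :: rest)) ↔ ((i, j) ∈ rest) := by
        rw [List.mem_cons]
        constructor
        · rintro (he | h)
          · rw [Prod.ext_iff] at he
            exact absurd he hq
          · exact h
        · exact Or.inr
      simp only [hcond]

-- under rectangularity and the invariant, B's to_flip set is exactly A's pass-flip set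
theorem SB_iff_SA (m : List (List Int)) (pos : List (Int × Int)) (rows cols : Nat)
    (hlen : m.length = rows) (hR : pvRect m cols) (hInv : pvInv rows cols m pos) (c : Int × Int) :
    c ∈ toFlip m ↔ SAp rows cols m pos c := by
  have hrowlen : ∀ i : Int, 0 ≤ i → i < (rows : Int) →
      (PySem.List.pyGetD m i []).length = cols := by
    intro i h0 h1
    rw [PySem.List.pyGetD_eq_getElem m [] h0 (by rw [hlen]; exact h1)]
    exact hR _ (List.getElem_mem _)
  have hHP : ∀ i j : Int, hasPosNeighbor m i j = true ↔
      ∃ q : Int × Int, AdjP (i, j) q ∧ pvInR rows cols q ∧ pvGetCell m q.1 q.2 > 0 := by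
    intro i j
    unfold hasPosNeighbor
    rw [List.any_eq_true]
    constructor
    · rintro ⟨q, hqmem, hq⟩
      rw [decide_eq_true_eq] at hq
      obtain ⟨h1, h2, h3, h4, h5⟩ := hq
      have h2' : q.1 < (rows : Int) := by rw [← hlen]; exact h2
      rw [hrowlen q.1 h1 h2'] at h4
      refine ⟨q, ?_, ⟨h1, h2', h3, h4⟩, h5⟩
      simp only [List.mem_cons, List.not_mem_nil, or_false] at hqmem
      unfold AdjP
      tauto
    · rintro ⟨q, hadj, ⟨h1, h2, h3, h4⟩, h5⟩
      refine ⟨q, ?_, ?_⟩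
      · simp only [List.mem_cons, List.not_mem_nil, or_false]
        unfold AdjP at hadj
        tauto
      · rw [decide_eq_true_eq]
        have h2' : q.1 < (m.length : Int) := by rw [hlen]; exact h2
        exact ⟨h1, h2', h3, by rw [hrowlen q.1 h1 h2]; exact h4, h5⟩
  rw [mem_toFlip]
  constructor
  · rintro ⟨h1, h2, h3, h4, h5, h6⟩
    have h2' : c.1 < (rows : Int) := by rw [← hlen]; exact h2
    rw [hrowlen c.1 h1 h2'] at h4
    refine ⟨⟨h1, h2', h3, h4⟩, h5, ?_⟩
    obtain ⟨q, hadj, hqin, hqpos⟩ := (hHP c.1 c.2).mp h6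
    have hadj' : AdjP c q := by simpa [Prod.mk.eta] using hadj
    have hqmem := hInv.2 c q ⟨h1, h2', h3, h4⟩ h5 hadj' hqin hqpos
    exact ⟨q, hqmem, AdjP_symm c q hadj'⟩
  · rintro ⟨⟨h1, h2, h3, h4⟩, h5, p', hp', hadj⟩
    obtain ⟨hpin, hppos⟩ := hInv.1 p' hp'
    have h2' : c.1 < (m.length : Int) := by rw [hlen]; exact h2
    refine ⟨h1, h2', h3, by rw [hrowlen c.1 h1 h2]; exact h4, h5, ?_⟩
    rw [hHP c.1 c.2]
    exact ⟨p', by simpa [Prod.mk.eta] using AdjP_symm p' c hadj, hpin, hppos⟩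

theorem Inv_step (rows cols : Nat) (m : List (List Int)) (pos : List (Int × Int))
    (m' : List (List Int)) (pos' : List (Int × Int)) (hInv : pvInv rows cols m pos)
    (hm' : ∀ i j : Int, (SAp rows cols m pos (i, j) →
        pvGetCell m' i j = pvGetCell m i j * -1) ∧
      (¬ SAp rows cols m pos (i, j) → pvGetCell m' i j = pvGetCell m i j))
    (hpos' : ∀ c, c ∈ pos' ↔ SAp rows cols m pos c) :
    pvInv rows cols m' pos' := by
  constructor
  · intro c hc
    have hS := (hpos' c).mp hc
    obtain ⟨hin, hneg, -⟩ := id hS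
    refine ⟨hin, ?_⟩
    have he := (hm' c.1 c.2).1 (by simpa [Prod.mk.eta] using hS)
    rw [he]
    omega
  · intro c q hinc hnegc hadj hinq hposq
    have hnSc : ¬ SAp rows cols m pos c := by
      intro hS
      have he := (hm' c.1 c.2).1 (by simpa [Prod.mk.eta] using hS)
      rw [he] at hnegc
      have := hS.2.1
      omega
    have hgc : pvGetCell m' c.1 c.2 = pvGetCell m c.1 c.2 :=
      (hm' c.1 c.2).2 (by simpa [Prod.mk.eta] using hnSc)
    by_cases hSq : SAp rows cols m pos q
    · exact (hpos' q).mpr hSq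
    · have hgq : pvGetCell m' q.1 q.2 = pvGetCell m q.1 q.2 :=
        (hm' q.1 q.2).2 (by simpa [Prod.mk.eta] using hSq)
      exfalso
      apply hnSc
      rw [hgc] at hnegc
      rw [hgq] at hposq
      have hqmem := hInv.2 c q hinc hnegc hadj hinq hposq
      exact ⟨hinc, hnegc, q, hqmem, AdjP_symm c q hadj⟩

-- the counting alignment: one A-pass = one B-round, A's passes = B's rounds + 1
theorem countAlign : ∀ (fuel : Nat) (m : List (List Int)) (pos : List (Int × Int)) (passes : Int)
    (rows cols : Nat), negCount m < fuel → m.length = rows → pvRect m cols →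
    pvInv rows cols m pos → pos ≠ [] →
    outerA m pos passes = loopB fuel m (passes + 1) := by
  intro fuel
  induction fuel with
  | zero =>
    intro m pos passes rows cols hμ _ _ _ _
    omega
  | succ f IH =>
    intro m pos passes rows cols hμ hlen hR hInv hne
    rw [outerA, dif_neg hne]
    show outerA (innerA m pos pos.length).1 (innerA m pos pos.length).2 (passes + 1)
      = loopB (f + 1) m (passes + 1)
    obtain ⟨i1, i2, i3⟩ := innerChar pos.length pos m rows cols hlen hR le_rfl
      (by rw [List.take_length]; exact fun p hp => (hInv.1 p hp).1)
    rw [List.take_length] at i2 i3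
    rw [List.drop_length] at i3
    have hSB := fun c => SB_iff_SA m pos rows cols hlen hR hInv c
    by_cases h0 : toFlip m = []
    · have hnoSA : ∀ c, ¬ SAp rows cols m pos c := by
        intro c hc
        have := (hSB c).mpr hc
        simp [h0] at this
      have hq2 : (innerA m pos pos.length).2 = [] := by
        rw [List.eq_nil_iff_forall_not_mem]
        intro c hc
        rcases (i3 c).mp hc with h | h
        · simp at h
        · exact hnoSA c h
      rw [hq2, outerA, dif_pos rfl]
      simp only [loopB]
      rw [if_pos h0]
    · have hmBeq : (innerA m pos pos.length).1 = applyFlips m (toFlip m) := by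
        obtain ⟨a1, a2⟩ := applyChar (toFlip m) m (nodup_toFlip m)
          (fun f hf => ((mem_toFlip m f).mp hf).2.2.2.2.1)
        apply matEq
        · rw [i1, a1]
        · intro i j
          rw [a2 i j]
          by_cases hS : SAp rows cols m pos (i, j)
          · rw [(i2 i j).1 hS, if_pos ((hSB (i, j)).mpr hS)]
          · rw [(i2 i j).2 hS, if_neg (fun hm_ => hS ((hSB _).mp hm_))]
      have hInv1 := Inv_step rows cols m pos (innerA m pos pos.length).1
        (innerA m pos pos.length).2 hInv (fun i j => ⟨(i2 i j).1, (i2 i j).2⟩)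
        (by intro c; rw [i3 c]; simp)
      have hlen' : (innerA m pos pos.length).1.length = rows :=
        (length_of_rowLens m _ i1).trans hlen
      have hR' := rect_of_rowLens m _ cols i1 hR
      have hcnt : negCount (applyFlips m (toFlip m)) < negCount m := loopB_dec m h0
      have hne' : (innerA m pos pos.length).2 ≠ [] := by
        obtain ⟨c, hc⟩ := List.exists_mem_of_ne_nil _ h0
        intro hnil
        have hcm : c ∈ (innerA m pos pos.length).2 := (i3 c).mpr (Or.inr ((hSB c).mp hc))
        simp [hnil] at hcm
      have hrec := IH (innerA m pos pos.length).1 (innerA m pos pos.length).2 (passes + 1)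
        rows cols (by rw [hmBeq]; omega) hlen' hR' hInv1 hne'
      rw [hrec, hmBeq]
      conv_rhs => simp only [loopB]
      rw [if_neg h0]

-- initial queue characterization
theorem mem_allPos (m : List (List Int)) (c : Int × Int) :
    c ∈ allPosPositions m ↔ ∃ k t : Nat, k < m.length ∧ t < (m.getD k []).length ∧
      c = ((k : Int), (t : Int)) ∧ 0 < (m.getD k []).getD t 0 := by
  have hrow : ∀ (row : List Int) (i s : Int) (c : Int × Int),
      c ∈ allPosRow row i s ↔ ∃ t : Nat, t < row.length ∧ c = (i, s + (t : Int)) ∧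
        0 < row.getD t 0 := by
    intro row
    induction row with
    | nil => intro i s c; simp [allPosRow]
    | cons v vs ih =>
      intro i s c
      simp only [allPosRow, List.mem_append, ih, List.length_cons]
      constructor
      · rintro (h | ⟨t, ht, rfl, hv⟩)
        · split_ifs at h with hv
          · simp only [List.mem_singleton] at h
            exact ⟨0, by omega, by simpa using h, by simpa using hv⟩
          · simp at h
        · refine ⟨t + 1, by omega, ?_, by simpa using hv⟩
          rw [Prod.ext_iff]
          constructor
          · rfl
          · push_cast
            ring
      · rintro ⟨t, ht, rfl, hv⟩
        cases t with
        | zero =>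
          left
          rw [if_pos (by simpa using hv)]
          simp
        | succ t' =>
          right
          refine ⟨t', by omega, ?_, by simpa using hv⟩
          rw [Prod.ext_iff]
          constructor
          · rfl
          · push_cast
            ring
  have haux : ∀ (ms : List (List Int)) (s : Int) (c : Int × Int),
      c ∈ allPosAux ms s ↔ ∃ k t : Nat, k < ms.length ∧ t < (ms.getD k []).length ∧
        c = (s + (k : Int), (t : Int)) ∧ 0 < (ms.getD k []).getD t 0 := by
    intro ms
    induction ms with
    | nil => intro s c; simp [allPosAux]
    | cons row rest ihm =>
      intro s c
      simp only [allPosAux, List.mem_append, hrow, ihm, List.length_cons]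
      constructor
      · rintro (⟨t, ht, rfl, hv⟩ | ⟨k, t, hk, ht, rfl, hv⟩)
        · exact ⟨0, t, by omega, by simpa using ht, by simp, by simpa using hv⟩
        · refine ⟨k + 1, t, by omega, by simpa using ht, ?_, by simpa using hv⟩
          rw [Prod.ext_iff]
          constructor
          · push_cast
            ring
          · rfl
      · rintro ⟨k, t, hk, ht, rfl, hv⟩
        cases k with
        | zero =>
          left
          exact ⟨t, by simpa using ht, by simp, by simpa using hv⟩
        | succ k' =>
          right
          refine ⟨k', t, by omega, by simpa using ht, ?_, by simpa using hv⟩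
          rw [Prod.ext_iff]
          constructor
          · push_cast
            ring
          · rfl
  unfold allPosPositions
  rw [haux]
  constructor
  · rintro ⟨k, t, hk, ht, rfl, hv⟩
    exact ⟨k, t, hk, ht, by simp, hv⟩
  · rintro ⟨k, t, hk, ht, rfl, hv⟩
    exact ⟨k, t, hk, ht, by simp, hv⟩

-- ===== VERDICT (by name: the statement is the Claim_ definition above) =====
theorem anyPos_exists (matrix : List (List Int)) (h : anyPositive matrix = true) :
    ∃ row ∈ matrix, ∃ v ∈ row, 0 < v := by
  unfold anyPositive at h
  rw [List.any_eq_true] at h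
  obtain ⟨row, hrow, hr⟩ := h
  rw [List.any_eq_true] at hr
  obtain ⟨v, hv, hvp⟩ := hr
  exact ⟨row, hrow, v, hv, by simpa using hvp⟩

theorem convertNeg_spec : Claim_equal_convertNeg := by
  unfold Claim_equal_convertNeg Spec_convertNeg
  intro matrix _ hpre
  unfold convertNeg convertNeg_alt
  by_cases hA : anyPositive matrix = true
  · rw [if_pos hA]
    obtain ⟨row, hrow, v, hv, hvpos⟩ := anyPos_exists matrix hA
    rcases hpre with hrect | hnp
    · have hR : pvRect matrix ((matrix.headD []).length) := hrect
      obtain ⟨k, hk, rfl⟩ := List.getElem_of_mem hrow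
      obtain ⟨t, ht, rfl⟩ := List.getElem_of_mem hv
      have hmem0 : ((k : Int), (t : Int)) ∈ allPosPositions matrix := by
        rw [mem_allPos]
        exact ⟨k, t, hk, by rw [List.getD_eq_getElem _ _ hk]; exact ht, rfl,
          by rw [List.getD_eq_getElem _ _ hk, List.getD_eq_getElem _ _ ht]; exact hvpos⟩
      have hne : allPosPositions matrix ≠ [] := by
        intro h
        rw [h] at hmem0
        simp at hmem0
      have hcols : ∀ k' : Nat, k' < matrix.length →
          (matrix.getD k' []).length = (matrix.headD []).length := by
        intro k' hk'
        rw [List.getD_eq_getElem _ _ hk']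
        exact hR _ (List.getElem_mem hk')
      have hInv : pvInv matrix.length ((matrix.headD []).length) matrix
          (allPosPositions matrix) := by
        constructor
        · intro p hp
          rw [mem_allPos] at hp
          obtain ⟨k', t', hk', ht', rfl, hv'⟩ := hp
          rw [hcols k' hk'] at ht'
          refine ⟨⟨by simp, by simpa using hk', by simp, by simpa using ht'⟩, ?_⟩
          rw [pvGet_natCast]
          exact hv'
        · intro c q hinc hnegc hadj hinq hposq
          rw [mem_allPos]
          obtain ⟨q1, q2, q3, q4⟩ := hinq
          refine ⟨q.1.toNat, q.2.toNat, by omega, ?_, by rw [Prod.ext_iff]; constructor <;> simp <;> omega, ?_⟩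
          · rw [hcols q.1.toNat (by omega)]
            omega
          · unfold pvGetCell at hposq
            rw [if_pos ⟨q1, q3⟩] at hposq
            exact hposq
      have hca := countAlign (negCount matrix + 1) matrix (allPosPositions matrix) 0
        matrix.length ((matrix.headD []).length) (by omega) rfl hR hInv hne
      rw [hca]
      norm_num
    · exfalso
      have := hnp _ hrow _ hv
      omega
  · rw [if_neg hA]
    have hnone : allPosPositions matrix = [] := by
      rw [List.eq_nil_iff_forall_not_mem]
      intro c hc
      rw [mem_allPos] at hc
      obtain ⟨k, t, hk, ht, _, hpos⟩ := hc
      apply hA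
      unfold anyPositive
      rw [List.any_eq_true]
      refine ⟨matrix.getD k [], by rw [List.getD_eq_getElem _ _ hk]; exact List.getElem_mem hk, ?_⟩
      rw [List.any_eq_true]
      refine ⟨(matrix.getD k []).getD t 0, ?_, by simpa using hpos⟩
      rw [List.getD_eq_getElem _ _ ht]
      exact List.getElem_mem ht
    rw [hnone, outerA, dif_pos rfl]
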